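-- pv_equiv track=rewrite | github.com/SahilSinnh/SF_DDL_Extractor | parser.py | split_qualified_name
-- ===== SOURCE A (Python) =====
-- from typing import List, Dict, Optional
--
-- def split_qualified_name(name: str) -> List[str]:
--     """
--     Splits a dot-separated qualified name, correctly handling quoted identifiers.
--     Example: '"DB"."SCH"."TBL"' -> ['"DB"', '"SCH"', '"TBL"']
--     """
--     parts, buf, in_dq, i = [], [], False, 0
--     while i < len(name):
--         ch = name[i]
--         if in_dq:
--             buf.append(ch)
--             if ch == '"':
--                 # Handle escaped double quote
--                 if i + 1 < len(name) and name[i+1] == '"':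
--                     buf.append('"'); i += 2; continue
--                 in_dq = False
--         elif ch == '"':
--             in_dq = True
--             buf.append(ch)
--         elif ch == '.':
--             parts.append(''.join(buf).strip())
--             buf = []
--         else:
--             buf.append(ch)
--         i += 1
--     if buf:
--         parts.append(''.join(buf).strip())
--     return [p for p in parts if p]
-- ===== SOURCE B (Python) =====
-- def split_qualified_name(name):
--     # A '.' is a separator iff it is preceded by an even number of '"' characters:
--     # the doubled-quote escape "" toggles the quote state twice, so plain parity
--     # of the quote count replaces A's in_dq/lookahead state machine. Segments are
--     # taken as slices between separators instead of a character buffer.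
--     parts, start, quotes = [], 0, 0
--     for i, ch in enumerate(name):
--         if ch == '"':
--             quotes += 1
--         elif ch == '.' and quotes % 2 == 0:
--             parts.append(name[start:i])
--             start = i + 1
--     parts.append(name[start:])
--     return [p for p in (s.strip() for s in parts) if p]
-- ===== Notes on version B (the rewrite author's own statement) =====
-- stated objective: simpler
-- what changed: Replaces A's in_dq flag with doubled-quote lookahead and a per-character buffer by a single pass that counts quote characters (a '.' separates iff preceded by an even number of '"') and takes the segments as slices between separator positions.
import Mathlib
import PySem

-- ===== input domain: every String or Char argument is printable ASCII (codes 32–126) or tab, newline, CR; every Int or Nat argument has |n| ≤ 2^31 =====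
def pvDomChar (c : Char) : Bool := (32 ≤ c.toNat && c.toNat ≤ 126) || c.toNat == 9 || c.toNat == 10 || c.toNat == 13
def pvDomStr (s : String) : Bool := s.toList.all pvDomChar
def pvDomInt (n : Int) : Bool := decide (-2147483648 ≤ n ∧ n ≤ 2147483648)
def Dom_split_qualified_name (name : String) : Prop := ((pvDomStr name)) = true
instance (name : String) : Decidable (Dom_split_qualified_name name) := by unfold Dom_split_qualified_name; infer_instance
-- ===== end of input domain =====

-- B replaces A's in_dq flag + doubled-quote lookahead by a plain quote COUNTER
-- (a '.' separates iff preceded by an even number of '"'), and replaces A's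
-- character buffer by slice boundaries; objective: simpler.

-- ===== PORT A =====
-- A's while loop over the characters with state (parts, buf, in_dq); the i/i+1/i+2
-- indexing becomes consuming one (or, for an escaped quote, two) characters of the
-- remaining suffix; branch order as in the Python.
def pvLoopA : List Char → List (List Char) → List Char → Bool → List (List Char)
  | [], parts, buf, _ => if buf ≠ [] then parts ++ [PySem.Chars.strip buf] else parts
  | ch :: rest, parts, buf, dq =>
    if dq then
      let buf' := buf ++ [ch]
      if ch = '"' then
        -- escaped double quote: 'if i + 1 < len(name) and name[i+1] == '"''
        match rest with
        | '"' :: rest2 => pvLoopA rest2 parts (buf' ++ ['"']) dq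
        | [] => pvLoopA [] parts buf' false
        | c2 :: rest2 => pvLoopA (c2 :: rest2) parts buf' false
      else
        pvLoopA rest parts buf' dq
    else if ch = '"' then
      pvLoopA rest parts (buf ++ [ch]) true
    else if ch = '.' then
      pvLoopA rest (parts ++ [PySem.Chars.strip buf]) [] dq
    else
      pvLoopA rest parts (buf ++ [ch]) dq

def split_qualified_name (name : String) : List String :=
  ((pvLoopA name.toList [] [] false).filter (· ≠ [])).map String.mk

-- ===== PORT B =====
-- B's for loop over enumerate(name) with state (parts, start, quotes): the suffix
-- still to visit plus its starting index i; the slice name[start:i] is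
-- (cs.drop start).take (i - start) and name[start:] is cs.drop start.
def pvLoopB (cs : List Char) : List Char → Nat → List (List Char) → Nat → Nat → List (List Char)
  | [], _, parts, start, _ => parts ++ [cs.drop start]
  | ch :: rest, i, parts, start, quotes =>
    if ch = '"' then
      pvLoopB cs rest (i+1) parts start (quotes + 1)
    else if ch = '.' ∧ quotes % 2 = 0 then
      pvLoopB cs rest (i+1) (parts ++ [(cs.drop start).take (i - start)]) (i+1) quotes
    else
      pvLoopB cs rest (i+1) parts start quotes

def split_qualified_name_alt (name : String) : List String :=
  ((((pvLoopB name.toList name.toList 0 [] 0 0).map PySem.Chars.strip).filter (· ≠ []))).map String.mk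

-- ===== PRECONDITION & SPEC =====
def Spec_split_qualified_name (name : String) (out : List String) : Prop := out = split_qualified_name_alt name
instance (name : String) (out : List String) : Decidable (Spec_split_qualified_name name out) := by unfold Spec_split_qualified_name; infer_instance

-- ===== CLAIM (what is proved, stated in full; the proofs are below) =====
def Claim_equal_split_qualified_name : Prop := ∀ (name : String), Dom_split_qualified_name name → Spec_split_qualified_name name (split_qualified_name name)

-- ===== LEMMAS AND PROOFS =====

-- buffer extension: appending cs[i] to the slice [start,i) gives the slice [start,i+1)
lemma pv_buf_ext (cs : List Char) (start i : Nat) (hsi : start ≤ i) (hi : i < cs.length) :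
    (cs.drop start).take (i - start) ++ [cs[i]] = (cs.drop start).take (i + 1 - start) := by
  have hlen : i - start < (cs.drop start).length := by simp [List.length_drop]; omega
  have : (cs.drop start)[i - start] = cs[i] := by
    rw [List.getElem_drop]; congr 1; omega
  rw [show i + 1 - start = (i - start) + 1 by omega, List.take_succ,
      List.getElem?_eq_getElem hlen]
  simp [this]

-- main invariant: A's loop (with stripped parts, buffer = slice [start,i), in_dq =
-- quote-count parity) and B's loop agree after the final strip-and-filter.
lemma pv_key (cs : List Char) (k : Nat) :
    ∀ i parts start quotes, k = cs.length - i → start ≤ i →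
    (pvLoopA (cs.drop i) (parts.map PySem.Chars.strip) ((cs.drop start).take (i - start))
        (decide (quotes % 2 = 1))).filter (· ≠ []) =
    ((pvLoopB cs (cs.drop i) i parts start quotes).map PySem.Chars.strip).filter (· ≠ []) := by
  induction k using Nat.strong_induction_on with
  | _ k ih =>
    intro i parts start quotes hk hsi
    by_cases hi : i < cs.length
    · have hcons : cs.drop i = cs[i] :: cs.drop (i+1) := List.drop_eq_getElem_cons hi
      rw [hcons]
      by_cases hq : cs[i] = '"'
      · -- a quote character
        by_cases hp : quotes % 2 = 1
        · -- inside quotes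
          rcases hrest : cs.drop (i+1) with _ | ⟨c2, rest2⟩
          · -- end of string right after the quote
            have key := ih (cs.length - (i+1)) (by omega) (i+1) parts start (quotes+1)
              rfl (by omega)
            have hmod : (quotes + 1) % 2 = 0 := by omega
            have e1 := pv_buf_ext cs start i hsi hi
            rw [hrest, ← e1, hq] at key
            simpa [pvLoopA, pvLoopB, hq, hp, hmod] using key
          · by_cases hc2 : c2 = '"'
            · -- escaped double quote: A consumes both, B consumes them one at a time
              have hi1 : i + 1 < cs.length := by
                have := congrArg List.length hrest
                simp [List.length_drop] at this; omega
              have hcons1 : cs.drop (i+1) = cs[i+1] :: cs.drop (i+1+1) :=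
                List.drop_eq_getElem_cons hi1
              have hgc : cs[i+1] = c2 := by
                rw [hrest] at hcons1; exact (List.cons.injEq _ _ _ _ ▸ hcons1).1.symm
              have key := ih (cs.length - (i+1+1)) (by omega) (i+1+1) parts start
                (quotes+1+1) rfl (by omega)
              have hmod : (quotes + 1 + 1) % 2 = 1 := by omega
              have e1 : (cs.drop start).take (i - start) ++ [cs[i]] ++ ['"']
                  = (cs.drop start).take (i + 1 + 1 - start) := by
                rw [pv_buf_ext cs start i hsi hi]
                have h2 := pv_buf_ext cs start (i+1) (by omega) hi1
                rw [hgc, hc2] at h2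
                exact h2
              have hrest2 : cs.drop (i+1+1) = rest2 := by
                rw [hrest] at hcons1
                exact ((List.cons.injEq _ _ _ _ ▸ hcons1).2).symm
              rw [← e1, hq, hrest2] at key
              subst hc2
              simpa [pvLoopA, pvLoopB, hq, hgc, hp, hmod] using key
            · -- a quote closing the quoted region
              have key := ih (cs.length - (i+1)) (by omega) (i+1) parts start (quotes+1)
                rfl (by omega)
              have hmod : (quotes + 1) % 2 = 0 := by omega
              have e1 := pv_buf_ext cs start i hsi hi
              rw [hrest, ← e1, hq] at key
              simpa [pvLoopA, pvLoopB, hq, hc2, hp, hmod] using key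
        · -- outside quotes, entering
          have hp0 : quotes % 2 = 0 := by omega
          have key := ih (cs.length - (i+1)) (by omega) (i+1) parts start (quotes+1)
            rfl (by omega)
          have hmod : (quotes + 1) % 2 = 1 := by omega
          have e1 := pv_buf_ext cs start i hsi hi
          rw [← e1, hq] at key
          simpa [pvLoopA, pvLoopB, hq, hp0, hmod] using key
      · by_cases hd : cs[i] = '.'
        · by_cases hp : quotes % 2 = 1
          · -- dot inside quotes: both loops just keep the character
            have key := ih (cs.length - (i+1)) (by omega) (i+1) parts start quotes
              rfl (by omega)
            have e1 := pv_buf_ext cs start i hsi hi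
            rw [← e1] at key
            simpa [pvLoopA, pvLoopB, hq, hd, hp] using key
          · -- separating dot
            have hp0 : quotes % 2 = 0 := by omega
            have key := ih (cs.length - (i+1)) (by omega) (i+1)
              (parts ++ [(cs.drop start).take (i - start)]) (i+1) quotes rfl (by omega)
            simpa [pvLoopA, pvLoopB, hq, hd, hp0] using key
        · -- ordinary character
          have key := ih (cs.length - (i+1)) (by omega) (i+1) parts start quotes
            rfl (by omega)
          have e1 := pv_buf_ext cs start i hsi hi
          rw [← e1] at key
          by_cases hp : quotes % 2 = 1
          · simpa [pvLoopA, pvLoopB, hq, hd, hp, -List.getElem_cons_drop] using key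
          · have hp0 : quotes % 2 = 0 := by omega
            simpa [pvLoopA, pvLoopB, hq, hd, hp0, -List.getElem_cons_drop] using key
    · -- end of the string
      have hnil : cs.drop i = [] := List.drop_eq_nil_of_le (by omega)
      rw [hnil]
      have hbuf : (cs.drop start).take (i - start) = cs.drop start := by
        apply List.take_of_length_le
        simp [List.length_drop]; omega
      rw [show pvLoopB cs [] i parts start quotes = parts ++ [cs.drop start] from rfl]
      rw [show pvLoopA [] (parts.map PySem.Chars.strip) ((cs.drop start).take (i - start))
            (decide (quotes % 2 = 1))
          = if (cs.drop start).take (i - start) ≠ [] then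
              parts.map PySem.Chars.strip ++ [PySem.Chars.strip ((cs.drop start).take (i - start))]
            else parts.map PySem.Chars.strip from rfl]
      rw [hbuf]
      by_cases hb : cs.drop start = ([] : List Char)
      · simp [hb]; decide
      · simp [hb, List.filter_append]

-- ===== VERDICT (by name: the statement is the Claim_ definition above) =====
theorem split_qualified_name_spec : Claim_equal_split_qualified_name := by
  intro name _
  unfold Spec_split_qualified_name split_qualified_name split_qualified_name_alt
  have h := pv_key name.toList (name.toList.length - 0) 0 [] 0 0 rfl (Nat.le_refl 0)
  simp only [Nat.sub_zero, List.drop_zero, List.take_zero, List.map_nil] at h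
  exact congrArg (List.map String.mk) h
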